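-- pv_equiv track=rewrite | github.com/ElkiGit/pytoneProcect | users.py | calculate_earnings
-- ===== SOURCE A (Python) =====
-- def calculate_earnings(customers_list):
--     total_earnings = 0
--     for customer_count in customers_list:
--         if customer_count % 8 == 0:
--             total_earnings += 200
--         else:
--             total_earnings += 200 + 50 * (customer_count % 8)
--     return total_earnings
-- ===== SOURCE B (Python) =====
-- def calculate_earnings(customers_list):
--     # Bucket aggregation: the payment depends only on the residue class mod 8
--     # (200 for residue 0, which equals 200 + 50*0), so count each residue
--     # class and pay each bucket at its rate.
--     total = 0
--     for r in range(8):
--         bucket = sum(1 for c in customers_list if c % 8 == r)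
--         total += (200 + 50 * r) * bucket
--     return total
-- ===== Notes on version B (the rewrite author's own statement) =====
-- stated objective: alternative
-- what changed: B aggregates by residue class instead of per element: for each residue r in 0..7 it counts the customers with c % 8 == r and pays the whole bucket at the rate 200 + 50*r (the redundant r==0 branch collapses into that rate), replacing A's branching per-element accumulator.
import Mathlib
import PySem

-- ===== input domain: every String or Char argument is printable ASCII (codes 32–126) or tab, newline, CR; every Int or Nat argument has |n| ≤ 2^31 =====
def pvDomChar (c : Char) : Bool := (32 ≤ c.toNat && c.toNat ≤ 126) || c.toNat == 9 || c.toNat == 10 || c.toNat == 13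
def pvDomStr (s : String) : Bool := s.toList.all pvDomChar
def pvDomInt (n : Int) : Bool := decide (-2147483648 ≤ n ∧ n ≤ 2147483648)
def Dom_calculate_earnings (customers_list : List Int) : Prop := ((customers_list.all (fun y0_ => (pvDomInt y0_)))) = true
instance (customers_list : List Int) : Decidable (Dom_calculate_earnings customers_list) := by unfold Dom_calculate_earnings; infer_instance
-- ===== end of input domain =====

-- ===== PORT A =====
-- B aggregates by residue class mod 8 (count each bucket, pay it at 200 + 50*r) instead of A's branching per-element accumulator; objective: alternative.
def calculate_earnings (customers_list : List Int) : Int :=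
  customers_list.foldl
    (fun total_earnings customer_count =>
      if PySem.Int.mod customer_count 8 = 0 then
        total_earnings + 200
      else
        total_earnings + (200 + 50 * PySem.Int.mod customer_count 8)) 0

-- ===== PORT B =====
def calculate_earnings_alt (customers_list : List Int) : Int :=
  (PySem.List.pyRange 0 8 1).foldl
    (fun total r =>
      let bucket : Int := (customers_list.map (fun c => if PySem.Int.mod c 8 = r then (1 : Int) else 0)).sum
      total + (200 + 50 * r) * bucket) 0

-- ===== PRECONDITION & SPEC =====
def Spec_calculate_earnings (customers_list : List Int) (out : Int) : Prop := out = calculate_earnings_alt customers_list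
instance (customers_list : List Int) (out : Int) : Decidable (Spec_calculate_earnings customers_list out) := by unfold Spec_calculate_earnings; infer_instance

-- ===== CLAIM (what is proved, stated in full; the proofs are below) =====
def Claim_equal_calculate_earnings : Prop := ∀ (customers_list : List Int), Dom_calculate_earnings customers_list → Spec_calculate_earnings customers_list (calculate_earnings customers_list)

-- ===== LEMMAS AND PROOFS =====

-- A's branch is a no-op: both branches add 200 + 50 * (c % 8).
theorem step_eq (t c : Int) :
    (if PySem.Int.mod c 8 = 0 then t + 200 else t + (200 + 50 * PySem.Int.mod c 8))
      = t + (200 + 50 * PySem.Int.mod c 8) := by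
  split_ifs with h
  · rw [h]; ring
  · rfl

theorem foldlA_eq (xs : List Int) (t : Int) :
    xs.foldl
      (fun total_earnings customer_count =>
        if PySem.Int.mod customer_count 8 = 0 then
          total_earnings + 200
        else
          total_earnings + (200 + 50 * PySem.Int.mod customer_count 8)) t
      = t + (xs.map (fun c => 200 + 50 * PySem.Int.mod c 8)).sum := by
  induction xs generalizing t with
  | nil => simp
  | cons x xs ih =>
    rw [List.foldl_cons, step_eq, ih]
    simp only [List.map_cons, List.sum_cons]
    ring

-- summing the indicator-weighted rates over r = 0..7 recovers the per-element rate
theorem indicator_sum (c : Int) :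
    ((200 : Int) + 50 * 0) * (if PySem.Int.mod c 8 = 0 then (1:Int) else 0)
    + (200 + 50 * 1) * (if PySem.Int.mod c 8 = 1 then (1:Int) else 0)
    + (200 + 50 * 2) * (if PySem.Int.mod c 8 = 2 then (1:Int) else 0)
    + (200 + 50 * 3) * (if PySem.Int.mod c 8 = 3 then (1:Int) else 0)
    + (200 + 50 * 4) * (if PySem.Int.mod c 8 = 4 then (1:Int) else 0)
    + (200 + 50 * 5) * (if PySem.Int.mod c 8 = 5 then (1:Int) else 0)
    + (200 + 50 * 6) * (if PySem.Int.mod c 8 = 6 then (1:Int) else 0)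
    + (200 + 50 * 7) * (if PySem.Int.mod c 8 = 7 then (1:Int) else 0)
    = 200 + 50 * PySem.Int.mod c 8 := by
  have h0 : (0:Int) ≤ PySem.Int.mod c 8 := PySem.Int.mod_nonneg c (by norm_num)
  have h8 : PySem.Int.mod c 8 < 8 := PySem.Int.mod_lt c (by norm_num)
  interval_cases h : PySem.Int.mod c 8 <;> norm_num

theorem buckets_eq (xs : List Int) :
    (200 + 50 * 0) * (xs.map (fun c => if PySem.Int.mod c 8 = 0 then (1:Int) else 0)).sum +
    (200 + 50 * 1) * (xs.map (fun c => if PySem.Int.mod c 8 = 1 then (1:Int) else 0)).sum +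
    (200 + 50 * 2) * (xs.map (fun c => if PySem.Int.mod c 8 = 2 then (1:Int) else 0)).sum +
    (200 + 50 * 3) * (xs.map (fun c => if PySem.Int.mod c 8 = 3 then (1:Int) else 0)).sum +
    (200 + 50 * 4) * (xs.map (fun c => if PySem.Int.mod c 8 = 4 then (1:Int) else 0)).sum +
    (200 + 50 * 5) * (xs.map (fun c => if PySem.Int.mod c 8 = 5 then (1:Int) else 0)).sum +
    (200 + 50 * 6) * (xs.map (fun c => if PySem.Int.mod c 8 = 6 then (1:Int) else 0)).sum +
    (200 + 50 * 7) * (xs.map (fun c => if PySem.Int.mod c 8 = 7 then (1:Int) else 0)).sum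
      = (xs.map (fun c => 200 + 50 * PySem.Int.mod c 8)).sum := by
  induction xs with
  | nil => simp
  | cons x xs ih =>
    simp only [List.map_cons, List.sum_cons, mul_add]
    linarith [ih, indicator_sum x]

theorem calculate_earnings_spec : Claim_equal_calculate_earnings := by
  intro xs _
  unfold Spec_calculate_earnings calculate_earnings calculate_earnings_alt
  rw [foldlA_eq]
  have hr : PySem.List.pyRange 0 8 1 = [0,1,2,3,4,5,6,7] := by decide
  rw [hr]
  simp only [List.foldl_cons, List.foldl_nil]
  have h := buckets_eq xs
  push_cast at h ⊢
  linarith [h]
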